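-- pv_equiv track=rewrite | github.com/lalitjain99/InterviewPrep | countAstrick.py | countAsterisks
-- ===== SOURCE A (Python) =====
-- def countAsterisks(s: str) -> int:
--     bar_even, star = True, 0
--     for c in s:
--         if c == '|':
--             bar_even = not bar_even
--         elif c == '*' and bar_even:
--             star += 1
--     return star
-- ===== SOURCE B (Python) =====
-- def countAsterisks(s: str) -> int:
--     return sum(seg.count('*') for i, seg in enumerate(s.split('|')) if i % 2 == 0)
-- ===== Notes on version B (the rewrite author's own statement) =====
-- stated objective: faster
-- what changed: Replaces the char-by-char parity-toggle loop with a split on the bar separator followed by summing asterisk counts over the even-indexed segments, moving the per-character work into C-level str.split/str.count.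
import Mathlib
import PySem

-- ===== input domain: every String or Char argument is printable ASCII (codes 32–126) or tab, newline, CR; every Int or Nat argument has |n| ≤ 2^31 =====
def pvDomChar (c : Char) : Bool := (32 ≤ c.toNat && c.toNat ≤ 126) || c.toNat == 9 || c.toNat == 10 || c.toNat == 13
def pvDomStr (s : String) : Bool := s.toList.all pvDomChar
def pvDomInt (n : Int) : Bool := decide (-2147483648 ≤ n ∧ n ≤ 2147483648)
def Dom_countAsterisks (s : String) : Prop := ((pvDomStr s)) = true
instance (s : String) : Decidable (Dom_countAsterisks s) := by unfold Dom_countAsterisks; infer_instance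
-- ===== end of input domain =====

-- B replaces A's char-by-char parity-toggle loop with a split on the bar separator plus a sum of
-- asterisk counts over the even-indexed segments (measured constant-factor speedup; same return value).

-- ===== PORT A =====
def countAsterisks (s : String) : Int :=
  (s.toList.foldl
    (fun (st : Bool × Int) c =>
      if c == '|' then (!st.1, st.2)
      else if c == '*' && st.1 then (st.1, st.2 + 1)
      else st)
    (true, 0)).2

-- ===== PORT B =====
def countAsterisks_alt (s : String) : Int :=
  (((PySem.List.enumerate (PySem.Chars.splitOn s.toList ['|'])).filter
      (fun p => PySem.Int.mod p.1 2 == 0)).map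
      (fun p => (PySem.Chars.count p.2 ['*'] : Int))).sum

-- ===== PRECONDITION & SPEC =====
def Spec_countAsterisks (s : String) (out : Int) : Prop := out = countAsterisks_alt s
instance (s : String) (out : Int) : Decidable (Spec_countAsterisks s out) := by unfold Spec_countAsterisks; infer_instance

-- ===== CLAIM (what is proved, stated in full; the proofs are below) =====
def Claim_equal_countAsterisks : Prop := ∀ (s : String), Dom_countAsterisks s → Spec_countAsterisks s (countAsterisks s)

-- ===== LEMMAS AND PROOFS =====

-- counting a single character with Python's substring count is List.count
lemma pv_count_go (c : Char) : ∀ (fuel : Nat) (l : List Char) (acc : Nat),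
    l.length ≤ fuel → PySem.Chars.count.go [c] fuel l acc = acc + l.count c := by
  intro fuel
  induction fuel with
  | zero =>
    intro l acc h
    cases l with
    | nil => simp [PySem.Chars.count.go]
    | cons c' rest => simp at h
  | succ n ih =>
    intro l acc h
    cases l with
    | nil => simp [PySem.Chars.count.go]
    | cons c' rest =>
      by_cases hc : c = c'
      · subst hc
        simp only [PySem.Chars.count.go, List.isPrefixOf, BEq.rfl, Bool.true_and,
          if_true, List.length_cons, List.drop_succ_cons,
          List.length_nil, List.drop_zero]
        rw [ih rest (acc + 1) (by simpa using Nat.lt_succ_iff.mp (by simpa using h))]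
        simp
        omega
      · have hpre : List.isPrefixOf [c] (c' :: rest) = false := by
          simp [List.isPrefixOf, hc]
        simp only [PySem.Chars.count.go, hpre]
        rw [ih rest acc (by simpa using Nat.lt_succ_iff.mp (by simpa using h))]
        simp [Ne.symm hc]

lemma pv_count_single (l : List Char) (c : Char) :
    PySem.Chars.count l [c] = l.count c := by
  simp [PySem.Chars.count]
  rw [pv_count_go c (l.length) l 0 (le_refl _)]
  omega

-- PySem's split on a one-character separator is List.splitOnP on that character
lemma pv_split_go (c : Char) : ∀ (fuel : Nat) (l cur : List Char) (acc : List (List Char)),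
    l.length ≤ fuel →
    PySem.Chars.splitOn.go [c] fuel l cur acc =
      acc.reverse ++ (l.splitOnP (· == c)).modifyHead (cur.reverse ++ ·) := by
  intro fuel
  induction fuel with
  | zero =>
    intro l cur acc h
    cases l with
    | nil => simp [PySem.Chars.splitOn.go, List.splitOnP_nil]
    | cons c' rest => simp at h
  | succ n ih =>
    intro l cur acc h
    cases l with
    | nil => simp [PySem.Chars.splitOn.go, List.splitOnP_nil]
    | cons c' rest =>
      have hlen : rest.length ≤ n := by simpa using Nat.lt_succ_iff.mp (by simpa using h)
      by_cases hc : c = c'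
      · subst hc
        simp only [PySem.Chars.splitOn.go, List.isPrefixOf, BEq.rfl, Bool.true_and,
          if_true, List.length_cons, List.drop_succ_cons,
          List.length_nil, List.drop_zero]
        rw [ih rest [] (cur.reverse :: acc) hlen]
        rw [List.splitOnP_cons]
        simp only [BEq.rfl, if_true]
        cases hps : rest.splitOnP (· == c) with
        | nil => exact absurd hps (List.splitOnP_ne_nil _ _)
        | cons p tl => simp
      · have hpre : List.isPrefixOf [c] (c' :: rest) = false := by
          simp [List.isPrefixOf, hc]
        simp only [PySem.Chars.splitOn.go, hpre]
        rw [ih rest (c' :: cur) acc hlen]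
        rw [List.splitOnP_cons]
        have : (c' == c) = false := by simp [Ne.symm hc]
        simp only [this]
        cases hps : rest.splitOnP (· == c) with
        | nil => exact absurd hps (List.splitOnP_ne_nil _ _)
        | cons p tl => simp

lemma pv_split_single (l : List Char) (c : Char) :
    PySem.Chars.splitOn l [c] = l.splitOnP (· == c) := by
  unfold PySem.Chars.splitOn
  rw [pv_split_go c (l.length + 1) l [] [] (by omega)]
  cases hps : l.splitOnP (· == c) with
  | nil => exact absurd hps (List.splitOnP_ne_nil _ _)
  | cons p tl => simp

-- the alternating sum of '*' counts over the segments, the shared middle ground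
def pvAltSum : Bool → List (List Char) → Int
  | _, [] => 0
  | b, p :: ps => (if b then (p.count '*' : Int) else 0) + pvAltSum (!b) ps

lemma pv_parity_succ (k : Int) : ((k + 1) % 2 == 0) = !(k % 2 == 0) := by
  rcases Int.emod_two_eq k with h | h
  · have h1 : (k + 1) % 2 = 1 := by omega
    simp [h, h1]
  · have h1 : (k + 1) % 2 = 0 := by omega
    simp [h, h1]

-- B's filtered-enumerate sum is pvAltSum at the parity of the start index
lemma pv_B_aux (parts : List (List Char)) : ∀ (k : Int),
    (((PySem.List.enumerate parts k).filter
        (fun p => p.1 % 2 == 0)).map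
        (fun p => (p.2.count '*' : Int))).sum
      = pvAltSum (k % 2 == 0) parts := by
  induction parts with
  | nil => intro k; simp [PySem.List.enumerate, pvAltSum]
  | cons p ps ih =>
    intro k
    simp only [PySem.List.enumerate, List.filter_cons]
    by_cases hk : (k % 2 == 0) = true
    · simp [hk, List.sum_cons, ih (k + 1), pv_parity_succ, pvAltSum]
    · simp only [Bool.not_eq_true] at hk
      simp [hk, ih (k + 1), pv_parity_succ, pvAltSum]

lemma pv_B_altSum (parts : List (List Char)) (k : Int) :
    (((PySem.List.enumerate parts k).filter
        (fun p => PySem.Int.mod p.1 2 == 0)).map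
        (fun p => (PySem.Chars.count p.2 ['*'] : Int))).sum
      = pvAltSum (k % 2 == 0) parts := by
  have hfun : (fun p : Int × List Char => PySem.Int.mod p.1 2 == 0)
      = (fun p : Int × List Char => p.1 % 2 == 0) := by
    funext p
    rw [PySem.Int.mod_eq_emod_of_pos (by norm_num)]
  rw [hfun]
  simp only [pv_count_single]
  exact pv_B_aux parts k

-- A's toggle loop computes pvAltSum over the split, whatever the running state
lemma pv_A_altSum (l : List Char) : ∀ (b : Bool) (n : Int),
    (l.foldl
      (fun (st : Bool × Int) c =>
        if c == '|' then (!st.1, st.2)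
        else if c == '*' && st.1 then (st.1, st.2 + 1)
        else st)
      (b, n)).2 = n + pvAltSum b (l.splitOnP (· == '|')) := by
  induction l with
  | nil => intro b n; simp [List.splitOnP_nil]; cases b <;> simp [pvAltSum]
  | cons c rest ih =>
    intro b n
    simp only [List.foldl_cons]
    by_cases hc : c = '|'
    · subst hc
      simp only [BEq.rfl, if_true, ih]
      rw [List.splitOnP_cons]
      simp only [BEq.rfl, if_true]
      cases b <;> simp [pvAltSum]
    · have hce : (c == '|') = false := by simp [hc]
      rw [List.splitOnP_cons]
      simp only [hce]
      cases hps : rest.splitOnP (· == '|') with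
      | nil => exact absurd hps (List.splitOnP_ne_nil _ _)
      | cons p tl =>
        cases b with
        | false =>
          simp only [Bool.and_false, Bool.false_eq_true, if_false, ih, hps]
          simp [pvAltSum]
        | true =>
          by_cases hs : c = '*'
          · subst hs
            simp only [BEq.rfl, Bool.and_true, if_true, ih, hps]
            simp [pvAltSum]
            omega
          · have hse : (c == '*') = false := by simp [hs]
            simp only [hse, Bool.false_and, Bool.false_eq_true, if_false, ih, hps]
            simp [pvAltSum, List.count_cons_of_ne hs]

-- ===== VERDICT (by name: the statement is the Claim_ definition above) =====
theorem countAsterisks_spec : Claim_equal_countAsterisks := by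
  intro s _
  unfold Spec_countAsterisks countAsterisks countAsterisks_alt
  rw [pv_split_single, pv_B_altSum, pv_A_altSum]
  norm_num
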